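-- pv_equiv track=rewrite | github.com/Shigeru430/numbers-ai-v7 | build_sim_numbers_v7.py | judge_hit_type
-- ===== SOURCE A (Python) =====
-- def judge_hit_type(pred_list: list[str], actual: str) -> tuple[str, str]:
--     """
--     app側の評価に合わせる。
--     戻り値:
--       hit_type, mark
--     """
--     hit = str(actual)
--
--     for pred in pred_list:
--         pred = str(pred)
--
--         if pred == hit:
--             return "straight", "◎"
--
--         if sorted(pred) == sorted(hit):
--             return "box", "〇"
--
--     best_pos_match = 0
--     best_digit_match = 0
--
--     for pred in pred_list:
--         pred = str(pred)
--
--         pos_match = sum(1 for a, b in zip(pred, hit) if a == b)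
--
--         hit_chars = list(hit)
--         digit_match = 0
--
--         for ch in pred:
--             if ch in hit_chars:
--                 digit_match += 1
--                 hit_chars.remove(ch)
--
--         best_pos_match = max(best_pos_match, pos_match)
--         best_digit_match = max(best_digit_match, digit_match)
--
--     if len(hit) == 3 and best_pos_match >= 2:
--         return "near", "▲"
--
--     if len(hit) == 4 and best_pos_match >= 3:
--         return "near", "▲"
--
--     if best_digit_match >= 2:
--         return "partial", "△"
--
--     if best_digit_match >= 1:
--         return "partial", "※"
--
--     return "none", "×"
-- ===== SOURCE B (Python) =====
-- def judge_hit_type(pred_list: list[str], actual: str) -> tuple[str, str]: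
--     hit = str(actual)
--     n = len(hit)
--     hit_counter = {}
--     for c in hit:
--         hit_counter[c] = hit_counter.get(c, 0) + 1
--
--     best_pos = 0
--     best_digit = 0
--     for pred in pred_list:
--         pred = str(pred)
--         if pred == hit:
--             return "straight", "◎"
--         pos = sum(a == b for a, b in zip(pred, hit))
--         digit = 0
--         rem = dict(hit_counter)
--         for ch in pred:
--             r = rem.get(ch, 0)
--             if r > 0:
--                 digit += 1
--                 rem[ch] = r - 1
--         if len(pred) == n and digit == n:
--             return "box", "〇"
--         if pos > best_pos:
--             best_pos = pos
--         if digit > best_digit: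
--             best_digit = digit
--
--     if n == 3 and best_pos >= 2:
--         return "near", "▲"
--     if n == 4 and best_pos >= 3:
--         return "near", "▲"
--     if best_digit >= 2:
--         return "partial", "△"
--     if best_digit >= 1:
--         return "partial", "※"
--     return "none", "×"
-- ===== Notes on version B (the rewrite author's own statement) =====
-- stated objective: faster
-- what changed: Replaces A's two sequential scans (sorted-string comparison for box, then a separate best-match scan with quadratic list-removal digit counting) by a single fused pass that builds a character-count dictionary of the actual draw once, counts digit matches by decrementing a copy of it, detects box from the multiset-intersection size instead of sorting each prediction, and maintains the running maxima in the same pass.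
import Mathlib
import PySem

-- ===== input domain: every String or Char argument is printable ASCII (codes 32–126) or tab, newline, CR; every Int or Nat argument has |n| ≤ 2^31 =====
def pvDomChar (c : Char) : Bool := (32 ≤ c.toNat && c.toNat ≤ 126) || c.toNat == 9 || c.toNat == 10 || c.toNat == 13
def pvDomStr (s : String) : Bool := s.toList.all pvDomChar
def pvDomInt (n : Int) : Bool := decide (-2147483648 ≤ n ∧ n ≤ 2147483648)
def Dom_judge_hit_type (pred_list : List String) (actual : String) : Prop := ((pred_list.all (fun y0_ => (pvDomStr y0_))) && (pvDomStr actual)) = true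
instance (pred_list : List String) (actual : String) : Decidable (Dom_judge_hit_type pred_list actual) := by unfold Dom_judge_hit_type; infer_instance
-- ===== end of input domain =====

-- B replaces A's two sequential scans (sorted-comparison hit scan, then a best-match scan with
-- list-removal digit counting) by one fused pass using a character-count dictionary: box is
-- detected from the multiset-intersection size and the running maxima are kept in the same pass.

-- ===== PORT A =====
-- first loop: straight/box scan with early return (none = loop fell through)
def jhA_scan : List String → String → Option (String × String)
  | [], _ => none
  | pred :: rest, hit =>
    if pred = hit then some ("straight", "◎")
    else if PySem.List.sorted pred.toList (fun x => x) false
            = PySem.List.sorted hit.toList (fun x => x) false then some ("box", "〇")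
    else jhA_scan rest hit

-- pos_match = sum(1 for a, b in zip(pred, hit) if a == b)
def jhA_pos (pred hit : List Char) : Nat :=
  (pred.zip hit).foldl (fun n ab => if ab.1 = ab.2 then n + 1 else n) 0

-- digit_match via the hit_chars list with first-occurrence removal
def jhA_digit (pred hit : List Char) : Nat :=
  (pred.foldl (fun (st : Nat × List Char) ch =>
      if st.2.contains ch then (st.1 + 1, st.2.erase ch) else st) (0, hit)).1

def judge_hit_type (pred_list : List String) (actual : String) : String × String :=
  match jhA_scan pred_list actual with
  | some r => r
  | none =>
    let st := pred_list.foldl (fun (st : Nat × Nat) pred =>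
      (max st.1 (jhA_pos pred.toList actual.toList),
       max st.2 (jhA_digit pred.toList actual.toList))) (0, 0)
    if actual.toList.length = 3 ∧ st.1 ≥ 2 then ("near", "▲")
    else if actual.toList.length = 4 ∧ st.1 ≥ 3 then ("near", "▲")
    else if st.2 ≥ 2 then ("partial", "△")
    else if st.2 ≥ 1 then ("partial", "※")
    else ("none", "×")

-- ===== PORT B =====
-- hit_counter = {} ; for c in hit: hit_counter[c] = hit_counter.get(c, 0) + 1
def jhB_counter (hit : List Char) : PySem.Dict Char Int :=
  hit.foldl (fun d c => d.insert c (d.getD c 0 + 1)) PySem.Dict.empty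

-- pos = sum(a == b for a, b in zip(pred, hit))
def jhB_pos (pred hit : List Char) : Nat :=
  ((pred.zip hit).map (fun ab => if ab.1 = ab.2 then 1 else 0)).sum

-- digit counting by decrementing a copy of the counter dict
def jhB_digit (pred : List Char) (rem : PySem.Dict Char Int) : Nat :=
  (pred.foldl (fun (st : Nat × PySem.Dict Char Int) ch =>
      let r := st.2.getD ch 0
      if r > 0 then (st.1 + 1, st.2.insert ch (r - 1)) else st) (0, rem)).1

def jhB_final (n bp bd : Nat) : String × String :=
  if n = 3 ∧ bp ≥ 2 then ("near", "▲")
  else if n = 4 ∧ bp ≥ 3 then ("near", "▲")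
  else if bd ≥ 2 then ("partial", "△")
  else if bd ≥ 1 then ("partial", "※")
  else ("none", "×")

-- the single fused pass
def jhB_go (hit : String) (n : Nat) (hc : PySem.Dict Char Int) :
    List String → Nat → Nat → String × String
  | [], bp, bd => jhB_final n bp bd
  | pred :: rest, bp, bd =>
    if pred = hit then ("straight", "◎")
    else
      let pos := jhB_pos pred.toList hit.toList
      let digit := jhB_digit pred.toList hc
      if pred.toList.length = n ∧ digit = n then ("box", "〇")
      else jhB_go hit n hc rest (if pos > bp then pos else bp) (if digit > bd then digit else bd)

def judge_hit_type_alt (pred_list : List String) (actual : String) : String × String :=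
  jhB_go actual actual.toList.length (jhB_counter actual.toList) pred_list 0 0

-- ===== PRECONDITION & SPEC =====
def Spec_judge_hit_type (pred_list : List String) (actual : String) (out : String × String) : Prop := out = judge_hit_type_alt pred_list actual
instance (pred_list : List String) (actual : String) (out : String × String) : Decidable (Spec_judge_hit_type pred_list actual out) := by unfold Spec_judge_hit_type; infer_instance

-- ===== CLAIM (what is proved, stated in full; the proofs are below) =====
def Claim_equal_judge_hit_type : Prop := ∀ (pred_list : List String) (actual : String), Dom_judge_hit_type pred_list actual → Spec_judge_hit_type pred_list actual (judge_hit_type pred_list actual)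

-- ===== LEMMAS AND PROOFS =====

-- pos: the two renderings of the zip sum agree
lemma pos_aux (l : List (Char × Char)) : ∀ (k : Nat),
    l.foldl (fun n ab => if ab.1 = ab.2 then n + 1 else n) k
      = k + (l.map (fun ab => if ab.1 = ab.2 then 1 else 0)).sum := by
  induction l with
  | nil => intro k; simp
  | cons a t ih => intro k; simp [List.foldl_cons, ih]; split_ifs <;> omega

lemma pos_eq (pred hit : List Char) : jhB_pos pred hit = jhA_pos pred hit := by
  rw [jhA_pos, jhB_pos, pos_aux]
  omega

-- digit: list-removal fold = dict-decrement fold, under the count invariant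
lemma digit_fold_eq (pred : List Char) :
    ∀ (k : Nat) (l : List Char) (d : PySem.Dict Char Int),
    (∀ c, (l.count c : Int) = d.getD c 0) →
    (pred.foldl (fun (st : Nat × List Char) ch =>
        if st.2.contains ch then (st.1 + 1, st.2.erase ch) else st) (k, l)).1
    = (pred.foldl (fun (st : Nat × PySem.Dict Char Int) ch =>
        let r := st.2.getD ch 0
        if r > 0 then (st.1 + 1, st.2.insert ch (r - 1)) else st) (k, d)).1 := by
  induction pred with
  | nil => intro k l d _; rfl
  | cons ch t ih =>
    intro k l d hinv
    simp only [List.foldl_cons]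
    have hcnt : (l.count ch : Int) = d.getD ch 0 := hinv ch
    by_cases hm : ch ∈ l
    · have hc : l.contains ch = true := by simpa using hm
      have hpos : d.getD ch 0 > 0 := by
        have : 0 < l.count ch := List.count_pos_iff.mpr hm
        omega
      simp only [hc, if_pos hpos, if_true]
      apply ih
      intro c
      rw [PySem.Dict.getD_insert, List.count_erase]
      rcases eq_or_ne c ch with rfl | hne
      · simp only [BEq.rfl, if_true]
        omega
      · have : (ch == c) = false := by simpa using (Ne.symm hne)
        simp only [this, if_neg hne]
        simpa using hinv c
    · have hc : l.contains ch = false := by simpa using hm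
      have hz : l.count ch = 0 := List.count_eq_zero.mpr hm
      have hnpos : ¬ d.getD ch 0 > 0 := by omega
      simp only [hc, if_neg hnpos]
      exact ih k l d hinv

lemma counter_getD (hit : List Char) (c : Char) :
    (jhB_counter hit).getD c 0 = (hit.count c : Int) := by
  rw [jhB_counter, PySem.Dict.getD_foldl_insert_add_one]
  simp

lemma digit_eq (pred hit : List Char) :
    jhB_digit pred (jhB_counter hit) = jhA_digit pred hit := by
  rw [jhA_digit, jhB_digit]
  exact (digit_fold_eq pred 0 hit (jhB_counter hit)
    (fun c => (counter_getD hit c).symm)).symm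

-- conditional step of A's removal fold, named for deterministic rewriting
lemma digitA_step_mem (k : Nat) (l : List Char) (ch : Char) (hm : ch ∈ l) :
    (if l.contains ch then ((k : Nat) + 1, l.erase ch) else (k, l)) = (k + 1, l.erase ch) := by
  have hc : l.contains ch = true := by simpa using hm
  rw [if_pos hc]

lemma digitA_step_not_mem (k : Nat) (l : List Char) (ch : Char) (hm : ch ∉ l) :
    (if l.contains ch then ((k : Nat) + 1, l.erase ch) else (k, l)) = (k, l) := by
  simp [hm]

-- A's removal fold reaches |pred| exactly when pred's multiset fits inside l's
lemma digitA_of_le (pred : List Char) :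
    ∀ (k : Nat) (l : List Char), (∀ c, pred.count c ≤ l.count c) →
    (pred.foldl (fun (st : Nat × List Char) ch =>
        if st.2.contains ch then (st.1 + 1, st.2.erase ch) else st) (k, l)).1 = k + pred.length := by
  induction pred with
  | nil => intro k l _; simp
  | cons ch t ih =>
    intro k l hle
    have hm : ch ∈ l := by
      have := hle ch
      simp at this
      exact List.count_pos_iff.mp (by omega)
    simp only [List.foldl_cons]
    rw [digitA_step_mem k l ch hm]
    rw [ih]
    · simp; omega
    · intro c
      rw [List.count_erase]
      have := hle c
      simp [List.count_cons] at this
      by_cases hne : c = ch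
      · subst hne; simp at this ⊢; omega
      · have hb : (ch == c) = false := by simpa using (Ne.symm hne)
        simp [hb] at this ⊢
        omega

lemma digitA_le (pred : List Char) :
    ∀ (k : Nat) (l : List Char),
    (pred.foldl (fun (st : Nat × List Char) ch =>
        if st.2.contains ch then (st.1 + 1, st.2.erase ch) else st) (k, l)).1 ≤ k + pred.length := by
  induction pred with
  | nil => intro k l; simp
  | cons ch t ih =>
    intro k l
    simp only [List.foldl_cons, List.length_cons]
    by_cases hm : ch ∈ l
    · rw [digitA_step_mem k l ch hm]
      have := ih (k + 1) (l.erase ch)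
      omega
    · rw [digitA_step_not_mem k l ch hm]
      have := ih k l
      omega

lemma le_of_digitA (pred : List Char) :
    ∀ (k : Nat) (l : List Char),
    (pred.foldl (fun (st : Nat × List Char) ch =>
        if st.2.contains ch then (st.1 + 1, st.2.erase ch) else st) (k, l)).1 = k + pred.length →
    (∀ c, pred.count c ≤ l.count c) := by
  induction pred with
  | nil => intro k l _ c; simp
  | cons ch t ih =>
    intro k l hfull c
    simp only [List.foldl_cons, List.length_cons] at hfull
    by_cases hm : ch ∈ l
    · rw [digitA_step_mem k l ch hm] at hfull
      have hpos : 0 < l.count ch := List.count_pos_iff.mpr hm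
      have ht := ih (k + 1) (l.erase ch) (by omega)
      have h1 := ht c
      rw [List.count_erase] at h1
      by_cases hne : c = ch
      · have hb : (ch == c) = true := by simp [hne]
        rw [hb] at h1
        have hpos' : 0 < l.count c := hne ▸ hpos
        rw [List.count_cons, hb]
        simp at h1 ⊢
        omega
      · have hb : (ch == c) = false := by simpa using (Ne.symm hne)
        rw [hb] at h1
        rw [List.count_cons, hb]
        simp at h1 ⊢
        omega
    · exfalso
      rw [digitA_step_not_mem k l ch hm] at hfull
      have := digitA_le t k l
      omega

-- box: sorted(pred) == sorted(hit)  <->  len(pred) == len(hit) and digit == len(hit)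
lemma box_iff (pred hit : List Char) :
    (PySem.List.sorted pred (fun x => x) false = PySem.List.sorted hit (fun x => x) false)
    ↔ (pred.length = hit.length ∧ jhA_digit pred hit = hit.length) := by
  rw [PySem.List.sorted_id_eq_sorted_id_iff_perm]
  constructor
  · intro hp
    have hlen := hp.length_eq
    refine ⟨hlen, ?_⟩
    have hcnt : ∀ c, pred.count c ≤ hit.count c := by
      intro c
      rw [List.perm_iff_count.mp hp c]
    rw [jhA_digit, digitA_of_le pred 0 hit hcnt]
    omega
  · rintro ⟨hlen, hdig⟩
    have hcnt := le_of_digitA pred 0 hit (by rw [jhA_digit] at hdig; omega)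
    have hle : (pred : Multiset Char) ≤ (hit : Multiset Char) := by
      rw [Multiset.le_iff_count]
      simpa using hcnt
    have heq : (pred : Multiset Char) = (hit : Multiset Char) :=
      Multiset.eq_of_le_of_card_le hle (by simpa using hlen.ge)
    exact Multiset.coe_eq_coe.mp heq

lemma if_gt_eq_max (a b : Nat) : (if b > a then b else a) = max a b := by
  split <;> omega

-- the fused pass = A's scan followed by A's max fold and the threshold block
lemma go_eq (actual : String) (pl : List String) :
    ∀ (bp bd : Nat),
    jhB_go actual actual.toList.length (jhB_counter actual.toList) pl bp bd =
      match jhA_scan pl actual with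
      | some r => r
      | none =>
        let st := pl.foldl (fun (st : Nat × Nat) pred =>
          (max st.1 (jhA_pos pred.toList actual.toList),
           max st.2 (jhA_digit pred.toList actual.toList))) (bp, bd)
        jhB_final actual.toList.length st.1 st.2 := by
  induction pl with
  | nil => intro bp bd; rfl
  | cons pred rest ih =>
    intro bp bd
    by_cases hs : pred = actual
    · simp only [jhB_go, jhA_scan, if_pos hs]
    · have hbox := box_iff pred.toList actual.toList
      by_cases hb : PySem.List.sorted pred.toList (fun x => x) false
          = PySem.List.sorted actual.toList (fun x => x) false
      · have hcond : pred.toList.length = actual.toList.length ∧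
            jhB_digit pred.toList (jhB_counter actual.toList) = actual.toList.length := by
          rw [digit_eq]
          exact hbox.mp hb
        simp only [jhB_go, jhA_scan, if_neg hs, if_pos hb, if_pos hcond]
      · have hcond : ¬ (pred.toList.length = actual.toList.length ∧
            jhB_digit pred.toList (jhB_counter actual.toList) = actual.toList.length) := by
          rw [digit_eq]
          exact fun h => hb (hbox.mpr h)
        simp only [jhB_go, jhA_scan, if_neg hs, if_neg hb, if_neg hcond]
        rw [pos_eq, digit_eq, if_gt_eq_max, if_gt_eq_max, ih]
        simp only [List.foldl_cons]

-- ===== VERDICT (by name: the statement is the Claim_ definition above) =====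
theorem judge_hit_type_spec : Claim_equal_judge_hit_type := by
  intro pred_list actual _
  unfold Spec_judge_hit_type judge_hit_type judge_hit_type_alt
  rw [go_eq]
  cases jhA_scan pred_list actual with
  | some r => rfl
  | none => simp [jhB_final]
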